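-- pv_equiv track=rewrite | github.com/Zoufalc/DynParQCircLearning | src/utilities/generate_toric_code_hamiltonian.py | sparse_to_paulistring
-- ===== SOURCE A (Python) =====
-- def sparse_to_paulistring(indices, qubits, pauli='X'):
--     string = ''
--     for i in range(qubits):
--         if i in indices:
--             string = pauli + string # Needed because of little endian convention in Qiskit
--         else:
--             string = 'I' + string
--     return string
-- ===== SOURCE B (Python) =====
-- def sparse_to_paulistring(indices, qubits, pauli='X'):
--     pieces = ['I'] * qubits
--     for idx in indices:
--         if 0 <= idx < qubits:
--             pieces[qubits - 1 - idx] = pauli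
--     return ''.join(pieces)
-- ===== Notes on version B (the rewrite author's own statement) =====
-- stated objective: faster
-- what changed: Replaces the per-position scan (membership test of every i in range(qubits) against indices, with repeated string prepending) by a scatter: allocate a list of 'I' pieces once, write pauli at qubits-1-idx for each in-bounds index, and join once.
import Mathlib
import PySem

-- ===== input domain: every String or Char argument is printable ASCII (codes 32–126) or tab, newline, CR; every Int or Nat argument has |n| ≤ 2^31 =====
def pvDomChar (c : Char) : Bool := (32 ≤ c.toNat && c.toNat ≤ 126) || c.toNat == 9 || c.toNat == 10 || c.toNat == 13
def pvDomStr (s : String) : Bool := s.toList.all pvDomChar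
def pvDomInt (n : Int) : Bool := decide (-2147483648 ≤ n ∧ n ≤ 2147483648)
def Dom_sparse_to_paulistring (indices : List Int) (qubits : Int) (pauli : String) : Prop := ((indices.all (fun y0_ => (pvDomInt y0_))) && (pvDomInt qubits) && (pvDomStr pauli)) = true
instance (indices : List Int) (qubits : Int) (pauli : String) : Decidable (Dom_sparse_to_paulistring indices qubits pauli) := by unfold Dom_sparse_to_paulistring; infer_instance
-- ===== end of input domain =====

-- B replaces A's per-position membership scan and string prepending by a one-pass scatter into a
-- preallocated piece list joined once (faster: removes the inner membership scan).


-- ===== PORT A =====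
def sparse_to_paulistring (indices : List Int) (qubits : Int) (pauli : String) : String :=
  (PySem.List.pyRange 0 qubits 1).foldl
    (fun string i => if indices.contains i then pauli ++ string else "I" ++ string) ""

-- ===== PORT B =====
def sparse_to_paulistring_alt (indices : List Int) (qubits : Int) (pauli : String) : String :=
  let pieces := List.replicate qubits.toNat "I"
  let pieces := indices.foldl
    (fun ps idx => if 0 ≤ idx ∧ idx < qubits then ps.set (qubits - 1 - idx).toNat pauli else ps)
    pieces
  String.join pieces

-- ===== PRECONDITION & SPEC =====
def Spec_sparse_to_paulistring (indices : List Int) (qubits : Int) (pauli : String) (out : String) : Prop := out = sparse_to_paulistring_alt indices qubits pauli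
instance (indices : List Int) (qubits : Int) (pauli : String) (out : String) : Decidable (Spec_sparse_to_paulistring indices qubits pauli out) := by unfold Spec_sparse_to_paulistring; infer_instance

-- ===== CLAIM (what is proved, stated in full; the proofs are below) =====
def Claim_equal_sparse_to_paulistring : Prop := ∀ (indices : List Int) (qubits : Int) (pauli : String), Dom_sparse_to_paulistring indices qubits pauli → Spec_sparse_to_paulistring indices qubits pauli (sparse_to_paulistring indices qubits pauli)

-- ===== LEMMAS AND PROOFS =====

/-- The piece that position `i` (little-endian qubit index) contributes. -/
def pvPiece (indices : List Int) (pauli : String) (i : Int) : String :=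
  if indices.contains i then pauli else "I"

/-- Folding `++` distributes over a prefix of the accumulator. -/
theorem pvFoldl_append (l : List String) (s t : String) :
    List.foldl (fun r u => r ++ u) (s ++ t) l = s ++ List.foldl (fun r u => r ++ u) t l := by
  induction l generalizing t with
  | nil => simp
  | cons a l ih => simp only [List.foldl_cons, String.append_assoc]; exact ih (t ++ a)

/-- `String.join` unfolds on a cons cell. -/
theorem pvJoin_cons (a : String) (l : List String) :
    String.join (a :: l) = a ++ String.join l := by
  simp only [String.join, List.foldl_cons]
  have h := pvFoldl_append l a ""
  simpa using h

/-- A's loop builds the join of the pieces in big-endian (reversed) order. -/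
theorem pvA_fold (indices : List Int) (pauli : String) (n : Nat) (s : String) :
    (PySem.List.pyRange 0 (n : Int) 1).foldl
      (fun string i => if indices.contains i then pauli ++ string else "I" ++ string) s
    = String.join ((List.range n).map
        (fun j : Nat => pvPiece indices pauli ((n : Int) - 1 - (j : Int)))) ++ s := by
  induction n generalizing s with
  | zero => simp [PySem.List.pyRange_one_eq_nil, String.join]
  | succ n ih =>
    rw [show ((n + 1 : Nat) : Int) = (n : Int) + 1 by push_cast; ring,
      PySem.List.pyRange_one_succ_right (by positivity), List.foldl_append]
    simp only [List.foldl_cons, List.foldl_nil, ih]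
    rw [List.range_succ_eq_map, List.map_cons, pvJoin_cons, List.map_map]
    simp [pvPiece, Function.comp_def, String.append_assoc]
    have he : ∀ x : Nat, ((n : Int) - 1 - (x : Int)) = (n : Int) - ((x : Int) + 1) :=
      fun x => by ring
    simp only [he]
    by_cases h : ((n : Int) ∈ indices) <;> simp [h]

/-- Element characterization of B's scatter loop. -/
theorem pvB_get (indices : List Int) (qubits : Int) (pauli : String) (ps : List String) (j : Nat) :
    (indices.foldl
      (fun ps idx => if 0 ≤ idx ∧ idx < qubits then ps.set (qubits - 1 - idx).toNat pauli else ps)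
      ps)[j]? =
    if indices.any (fun idx => decide (0 ≤ idx) && decide (idx < qubits)
        && ((qubits - 1 - idx).toNat == j)) ∧ j < ps.length
    then some pauli else ps[j]? := by
  induction indices generalizing ps with
  | nil => simp
  | cons a l ih =>
    simp only [List.foldl_cons, List.any_cons]
    by_cases hg : 0 ≤ a ∧ a < qubits
    · rw [if_pos hg, ih, List.length_set]
      by_cases hj : (qubits - 1 - a).toNat = j
      · by_cases hlen : j < ps.length
        · simp [hg, hj, hlen]
        · simp [hg, hj, hlen]
      · simp only [List.getElem?_set]
        have : ((qubits - 1 - a).toNat == j) = false := by simp [hj]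
        simp [hg, this, hj]
    · rw [if_neg hg, ih]
      have : (decide (0 ≤ a) && decide (a < qubits)) = false := by
        rcases not_and_or.mp hg with h | h <;> simp [h]
      simp [this]

/-- B's final piece list, described positionally. -/
theorem pvB_pieces (indices : List Int) (qubits : Int) (pauli : String) :
    (indices.foldl
      (fun ps idx => if 0 ≤ idx ∧ idx < qubits then ps.set (qubits - 1 - idx).toNat pauli else ps)
      (List.replicate qubits.toNat "I"))
    = (List.range qubits.toNat).map (fun j : Nat => pvPiece indices pauli (qubits - 1 - (j : Int))) := by
  apply List.ext_getElem?
  intro j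
  rw [pvB_get]
  by_cases hj : j < qubits.toNat
  · have hrange : (List.range qubits.toNat)[j]? = some j := by
      simp [List.getElem?_range hj]
    have hcond : (indices.any (fun idx => decide (0 ≤ idx) && decide (idx < qubits)
        && ((qubits - 1 - idx).toNat == j)) = true) ↔ (qubits - 1 - (j : Int)) ∈ indices := by
      simp only [List.any_eq_true, Bool.and_eq_true, beq_iff_eq, decide_eq_true_eq]
      constructor
      · rintro ⟨x, hx, ⟨h0, h1⟩, h2⟩
        have hxval : x = qubits - 1 - (j : Int) := by omega
        exact hxval ▸ hx
      · intro hm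
        exact ⟨_, hm, ⟨by omega, by omega⟩, by omega⟩
    by_cases hm : (qubits - 1 - (j : Int)) ∈ indices
    · have hc := hcond.mpr hm
      simp [hc, hj, pvPiece, hm]
    · have hc : (indices.any (fun idx => decide (0 ≤ idx) && decide (idx < qubits)
          && ((qubits - 1 - idx).toNat == j))) = false := by
        rw [← Bool.not_eq_true]; exact fun h => hm (hcond.mp h)
      simp [hc, pvPiece, hm, hj]
  · simp [hj]

-- ===== VERDICT (by name: the statement is the Claim_ definition above) =====
theorem sparse_to_paulistring_spec : Claim_equal_sparse_to_paulistring := by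
  intro indices qubits pauli _
  unfold Spec_sparse_to_paulistring
  simp only [sparse_to_paulistring, sparse_to_paulistring_alt]
  rw [pvB_pieces]
  by_cases hq : 0 ≤ qubits
  · have hcast : (qubits.toNat : Int) = qubits := Int.toNat_of_nonneg hq
    rw [← hcast, pvA_fold]
    simp [max_eq_left hq]
  · have h0 : qubits.toNat = 0 := by omega
    rw [PySem.List.pyRange_one_eq_nil (by omega), h0]
    simp [String.join]
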